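-- pv_equiv track=rewrite | github.com/rahulsharma0497/Assignment10 | Question2.py | last_remaining_number
-- ===== SOURCE A (Python) =====
-- def last_remaining_number(n):
--   """
--   Returns the last number that remains in arr.
--
--   Args:
--     n: An integer.
--
--   Returns:
--     The last number that remains in arr.
--   """
--
--   arr = list(range(1, n + 1))
--   while len(arr) > 1:
--     if len(arr) % 2 == 1:
--       arr.pop(0)
--     else:
--       arr = arr[1::2]
--   return arr[0]
-- ===== SOURCE B (Python) =====
-- def last_remaining_number(n):
--   # The elimination always keeps the last element of the array (pop(0) keeps it
--   # when the length is odd; arr[1::2] keeps it when the length is even), so the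
--   # survivor is simply n.  Closed form, O(1).
--   return n
-- ===== Notes on version B (the rewrite author's own statement) =====
-- stated objective: faster
-- what changed: Replaced the whole elimination simulation by the closed form 'return n': each round (pop(0) on odd length, arr[1::2] on even length) preserves the last element, so the survivor is always n.
import Mathlib
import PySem

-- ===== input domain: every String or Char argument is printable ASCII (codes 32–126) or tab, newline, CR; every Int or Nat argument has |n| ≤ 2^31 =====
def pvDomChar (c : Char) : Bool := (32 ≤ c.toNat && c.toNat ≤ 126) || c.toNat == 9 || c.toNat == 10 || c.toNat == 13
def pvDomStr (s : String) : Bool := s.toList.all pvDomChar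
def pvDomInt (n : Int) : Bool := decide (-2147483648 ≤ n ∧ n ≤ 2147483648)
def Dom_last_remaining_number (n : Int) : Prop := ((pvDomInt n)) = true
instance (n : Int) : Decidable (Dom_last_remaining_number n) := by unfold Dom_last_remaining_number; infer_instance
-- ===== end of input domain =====

-- B replaces A's O(n) elimination loop by the closed form 'return n' (each round keeps the last element).

-- ===== PORT A =====
-- hand port of the slice arr[1::2] (elements at odd indices), exact for any list
def pvSliceOdd : List Int → List Int
  | [] => []
  | [_] => []
  | _ :: b :: t => b :: pvSliceOdd t

theorem pvSliceOdd_length (l : List Int) : (pvSliceOdd l).length = l.length / 2 := by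
  induction l using pvSliceOdd.induct <;> simp [pvSliceOdd, *] <;> omega

theorem pvSliceOdd_length_lt (l : List Int) (h : 1 < l.length) :
    (pvSliceOdd l).length < l.length := by
  rw [pvSliceOdd_length]; omega

-- while len(arr) > 1: if len odd, arr.pop(0) (drop the head) else arr = arr[1::2]
def pvLoopA (arr : List Int) : List Int :=
  if h : 1 < arr.length then
    if arr.length % 2 == 1 then pvLoopA arr.tail
    else pvLoopA (pvSliceOdd arr)
  else arr
termination_by arr.length
decreasing_by
  · simp [List.length_tail]; omega
  · exact pvSliceOdd_length_lt arr h

def last_remaining_number (n : Int) : Int :=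
  -- arr = list(range(1, n+1)); loop; return arr[0] (Pre_ guarantees the index exists)
  PySem.List.pyGetD (pvLoopA (PySem.List.pyRange 1 (n + 1) 1)) 0 0

-- ===== PORT B =====
def last_remaining_number_alt (n : Int) : Int := n

-- ===== PRECONDITION & SPEC =====
-- Pre_ excludes nonpositive inputs, where the array is empty and Python A raises IndexError on arr[0].
def Pre_last_remaining_number (n : Int) : Prop := 1 ≤ n
instance (n : Int) : Decidable (Pre_last_remaining_number n) := by unfold Pre_last_remaining_number; infer_instance
def pvWitness_last_remaining_number : Int := 5

def Spec_last_remaining_number (n : Int) (out : Int) : Prop := out = last_remaining_number_alt n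
instance (n : Int) (out : Int) : Decidable (Spec_last_remaining_number n out) := by unfold Spec_last_remaining_number; infer_instance

-- ===== CLAIM (what is proved, stated in full; the proofs are below) =====
def Claim_equal_last_remaining_number : Prop := ∀ (n : Int), Dom_last_remaining_number n → Pre_last_remaining_number n → Spec_last_remaining_number n (last_remaining_number n)

-- ===== LEMMAS AND PROOFS =====

theorem pv_getLast?_cons (a : Int) (l : List Int) (h : l ≠ []) :
    (a :: l).getLast? = l.getLast? := by
  rcases l with _ | ⟨b, t⟩
  · simp at h
  · simp [List.getLast?_cons_cons]

-- the slice arr[1::2] of an even-length list keeps the last element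
theorem pvSliceOdd_getLast? (l : List Int) (he : l.length % 2 = 0) (hne : l ≠ []) :
    (pvSliceOdd l).getLast? = l.getLast? ∧ pvSliceOdd l ≠ [] := by
  induction l using pvSliceOdd.induct with
  | case1 => simp at hne
  | case2 a => simp at he
  | case3 a b t ih =>
    rcases t with _ | ⟨c, t'⟩
    · simp [pvSliceOdd]
    · have he' : (c :: t').length % 2 = 0 := by
        simp only [List.length_cons] at he ⊢; omega
      obtain ⟨h1, h2⟩ := ih he' (by simp)
      refine ⟨?_, by simp [pvSliceOdd]⟩
      show (b :: pvSliceOdd (c :: t')).getLast? = _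
      rw [pv_getLast?_cons _ _ h2, h1, List.getLast?_cons_cons, List.getLast?_cons_cons]

-- the loop always ends with the singleton holding the original last element
theorem pvLoopA_last (arr : List Int) (hne : arr ≠ []) :
    pvLoopA arr = [arr.getLast hne] := by
  induction arr using pvLoopA.induct with
  | case1 arr h hodd ih =>
    rw [pvLoopA, dif_pos h, if_pos hodd]
    have htne : arr.tail ≠ [] := by
      rcases arr with _ | ⟨a, t⟩
      · simp at hne
      · simp only [List.tail_cons]; rintro rfl; simp at h
    rw [ih htne]
    congr 1
    have e : arr.tail.getLast? = arr.getLast? := by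
      rcases arr with _ | ⟨a, t⟩
      · simp at hne
      · simp only [List.tail_cons]
        exact (pv_getLast?_cons a t (by simpa using htne)).symm
    rw [List.getLast?_eq_some_getLast htne, List.getLast?_eq_some_getLast hne] at e
    exact Option.some.inj e
  | case2 arr h hodd ih =>
    rw [pvLoopA, dif_pos h, if_neg hodd]
    have heven : arr.length % 2 = 0 := by
      simp only [beq_iff_eq] at hodd; omega
    obtain ⟨h1, h2⟩ := pvSliceOdd_getLast? arr heven hne
    rw [ih h2]
    congr 1
    have e := h1
    rw [List.getLast?_eq_some_getLast h2, List.getLast?_eq_some_getLast hne] at e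
    exact Option.some.inj e
  | case3 arr h =>
    rw [pvLoopA, dif_neg h]
    rcases arr with _ | ⟨a, t⟩
    · simp at hne
    · rcases t with _ | ⟨b, t'⟩
      · simp
      · simp at h

-- ===== VERDICT (by name: the statement is the Claim_ definition above) =====
theorem last_remaining_number_spec : Claim_equal_last_remaining_number := by
  intro n _ hpre
  have h1 : (1 : Int) ≤ n := hpre
  unfold Spec_last_remaining_number last_remaining_number last_remaining_number_alt
  rw [PySem.List.pyRange_one_succ_right (by omega)]
  have hne : PySem.List.pyRange 1 n 1 ++ [n] ≠ [] := by simp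
  rw [pvLoopA_last _ hne]
  simp [PySem.List.pyGetD]
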